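-- pv_equiv track=rewrite | github.com/nathanelms/Database-whisperer | database_whisper/text.py | meaning_addresses
-- ===== SOURCE A (Python) =====
-- from collections import Counter, defaultdict
-- from typing import Any, Dict, List, Optional, Set, Tuple
--
-- def meaning_addresses(
--     instances: List[Dict[str, str]],
--     ladder_fields: List[str],
-- ) -> Dict[str, Dict[tuple, List[Dict]]]:
--     """
--     Group concept instances by their meaning-address.
--
--     The address is defined by the values of the ladder fields
--     for each instance. Instances at the same address are
--     structurally indistinguishable — aliased.
--
--     Args:
--         instances: output of extract_concept_instances
--         ladder_fields: field names from the DW ladder (in order)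
--
--     Returns:
--         {concept: {address_tuple: [instances]}}
--     """
--     addresses = defaultdict(lambda: defaultdict(list))
--     for inst in instances:
--         concept = inst["concept"]
--         addr = tuple(inst.get(f, "none") for f in ladder_fields)
--         addresses[concept][addr].append(inst)
--     return dict(addresses)
-- ===== SOURCE B (Python) =====
-- def meaning_addresses(instances, ladder_fields):
--     # Two-level group-by: dedup the keys in first-occurrence order, then
--     # build each group by filtering, instead of one-pass defaultdict bucketing.
--     def addr(inst):
--         return tuple(inst.get(f, "none") for f in ladder_fields)
--     concepts = list(dict.fromkeys(inst["concept"] for inst in instances))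
--     out = {}
--     for c in concepts:
--         group = [i for i in instances if i["concept"] == c]
--         addrs = list(dict.fromkeys(addr(i) for i in group))
--         out[c] = {a: [i for i in group if addr(i) == a] for a in addrs}
--     return out
-- ===== Notes on version B (the rewrite author's own statement) =====
-- stated objective: alternative
-- what changed: Replaced the single-pass defaultdict bucketing with a two-level group-by: dedup the concept keys (dict.fromkeys) and the address keys in first-occurrence order, then build each group by filtering comprehensions.
import Mathlib
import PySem

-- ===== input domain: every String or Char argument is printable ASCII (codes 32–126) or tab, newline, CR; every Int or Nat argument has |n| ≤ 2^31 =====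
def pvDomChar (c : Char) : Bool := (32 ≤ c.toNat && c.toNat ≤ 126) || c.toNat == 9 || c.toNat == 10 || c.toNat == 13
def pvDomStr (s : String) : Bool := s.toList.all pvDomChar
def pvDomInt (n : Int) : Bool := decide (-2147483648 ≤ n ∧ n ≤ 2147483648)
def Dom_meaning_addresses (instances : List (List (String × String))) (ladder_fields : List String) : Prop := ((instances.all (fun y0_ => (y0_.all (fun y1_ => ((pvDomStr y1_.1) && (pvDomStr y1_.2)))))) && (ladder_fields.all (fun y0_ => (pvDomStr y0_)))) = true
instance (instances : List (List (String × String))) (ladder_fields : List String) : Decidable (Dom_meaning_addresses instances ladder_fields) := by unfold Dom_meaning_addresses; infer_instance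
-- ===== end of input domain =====

-- B replaces A's single-pass defaultdict bucketing by a two-level group-by (ordered key dedup
-- + filter per group); alternative decomposition, same return value.

-- ===== PORT A =====
-- A: addresses = defaultdict(lambda: defaultdict(list)); for inst: addresses[concept][addr].append(inst); return dict(addresses)
def meaning_addresses (instances : List (List (String × String))) (ladder_fields : List String) : List (String × List (List String × List (List (String × String)))) :=
  let d : PySem.Dict String (PySem.Dict (List String) (List (List (String × String)))) :=
    instances.foldl (fun acc inst =>
      let concept := ((PySem.Dict.mk inst).get? "concept").getD ""   -- inst["concept"]; Pre_ excludes the KeyError case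
      let addr := ladder_fields.map (fun f => (PySem.Dict.mk inst).getD f "none")
      acc.modify concept PySem.Dict.empty (fun inner => inner.modify addr [] (fun l => l ++ [inst])))
      PySem.Dict.empty
  d.items.map (fun p => (p.1, p.2.items))

-- ===== PORT B =====
-- B: concepts = dedup of concept keys; per concept filter the group; dedup its addresses; per address filter again.
def meaning_addresses_alt (instances : List (List (String × String))) (ladder_fields : List String) : List (String × List (List String × List (List (String × String)))) :=
  let con := fun (inst : List (String × String)) => ((PySem.Dict.mk inst).get? "concept").getD ""
  let addr := fun (inst : List (String × String)) => ladder_fields.map (fun f => (PySem.Dict.mk inst).getD f "none")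
  (PySem.List.dedup (instances.map con)).map (fun c =>
    let g := instances.filter (fun i => con i == c)
    (c, (PySem.List.dedup (g.map addr)).map (fun a => (a, g.filter (fun i => addr i == a)))))

-- ===== PRECONDITION & SPEC =====
-- Pre_ excludes exactly the instances lacking a "concept" key, where Python A raises KeyError.
def Pre_meaning_addresses (instances : List (List (String × String))) (ladder_fields : List String) : Prop :=
  ∀ inst ∈ instances, "concept" ∈ inst.map Prod.fst
instance (instances : List (List (String × String))) (ladder_fields : List String) : Decidable (Pre_meaning_addresses instances ladder_fields) := by unfold Pre_meaning_addresses; infer_instance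
def pvWitness_meaning_addresses : (List (List (String × String))) × List String :=
  ([[("concept", "c"), ("f", "1")], [("concept", "d")]], ["f"])

def Spec_meaning_addresses (instances : List (List (String × String))) (ladder_fields : List String) (out : List (String × List (List String × List (List (String × String))))) : Prop := out = meaning_addresses_alt instances ladder_fields
instance (instances : List (List (String × String))) (ladder_fields : List String) (out : List (String × List (List String × List (List (String × String))))) : Decidable (Spec_meaning_addresses instances ladder_fields out) := by
  unfold Spec_meaning_addresses
  haveI h4 : DecidableEq (List (List String × List (List (String × String)))) := inferInstance
  haveI h5 : DecidableEq (String × List (List String × List (List (String × String)))) := inferInstance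
  infer_instance

-- ===== CLAIM (what is proved, stated in full; the proofs are below) =====
def Claim_equal_meaning_addresses : Prop := ∀ (instances : List (List (String × String))) (ladder_fields : List String), Dom_meaning_addresses instances ladder_fields → Pre_meaning_addresses instances ladder_fields → Spec_meaning_addresses instances ladder_fields (meaning_addresses instances ladder_fields)

-- ===== LEMMAS AND PROOFS =====

-- Grouped-fold lemma: looking up key c after a loop of modifies at (k x) is the
-- inner loop over exactly the x whose key is c.
theorem pv_getD_foldl_modify_key {α κ ν : Type} [BEq κ] [LawfulBEq κ] [DecidableEq κ]
    (l : List α) (k : α → κ) (d0 : ν) (g : α → ν → ν)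
    (d : PySem.Dict κ ν) (c : κ) :
    (l.foldl (fun acc x => acc.modify (k x) d0 (g x)) d).getD c d0
      = (l.filter (fun x => k x == c)).foldl (fun v x => g x v) (d.getD c d0) := by
  induction l generalizing d with
  | nil => rfl
  | cons x xs ih =>
    simp only [List.foldl_cons, List.filter_cons]
    rw [ih]
    rcases Decidable.em (k x = c) with h | h
    · simp [h]
    · have hb : (k x == c) = false := by simp [h]
      rw [hb, PySem.Dict.getD_modify, if_neg (fun hc => h hc.symm)]
      simp

-- One grouping level packaged: items of the fold-of-modifies dict = dedup'd keys paired with filtered groups folded by g.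
theorem pv_items_foldl_modify_key {α κ ν : Type} [BEq κ] [LawfulBEq κ] [DecidableEq κ]
    (l : List α) (k : α → κ) (d0 : ν) (g : α → ν → ν) :
    (l.foldl (fun acc x => acc.modify (k x) d0 (g x)) PySem.Dict.empty).items
      = (PySem.List.dedup (l.map k)).map
          (fun c => (c, (l.filter (fun x => k x == c)).foldl (fun v x => g x v) d0)) := by
  have hk : (l.foldl (fun acc x => acc.modify (k x) d0 (g x)) PySem.Dict.empty).keys
      = PySem.List.dedup (l.map k) := by
    rw [PySem.Dict.keys_foldl_modify_key l k d0 (fun _ x => g x) PySem.Dict.empty,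
        PySem.Dict.keys_empty, PySem.List.dedup_eq_ofList]
    rfl
  have hnd : (l.foldl (fun acc x => acc.modify (k x) d0 (g x)) PySem.Dict.empty).keys.Nodup := by
    rw [hk]; exact PySem.List.nodup_dedup _
  rw [PySem.Dict.items_eq_map_keys _ hnd d0, hk]
  refine List.map_congr_left (fun c _ => ?_)
  rw [pv_getD_foldl_modify_key l k d0 g PySem.Dict.empty c, PySem.Dict.getD_empty]

-- ===== VERDICT (by name: the statement is the Claim_ definition above) =====
theorem meaning_addresses_spec : Claim_equal_meaning_addresses := by
  intro instances ladder_fields _ _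
  unfold Spec_meaning_addresses meaning_addresses meaning_addresses_alt
  simp only []
  rw [pv_items_foldl_modify_key instances
        (fun inst => ((PySem.Dict.mk inst).get? "concept").getD "")
        PySem.Dict.empty
        (fun inst inner => inner.modify (ladder_fields.map (fun f => (PySem.Dict.mk inst).getD f "none")) [] (fun l => l ++ [inst]))]
  rw [List.map_map]
  refine List.map_congr_left (fun c _ => ?_)
  simp only [Function.comp]
  rw [pv_items_foldl_modify_key _
        (fun inst => ladder_fields.map (fun f => (PySem.Dict.mk inst).getD f "none"))
        []
        (fun inst l => l ++ [inst])]
  refine congrArg _ (List.map_congr_left (fun a _ => ?_))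
  rw [PySem.List.foldl_append_singleton_eq_self]
  simp
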